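-- pv_equiv track=rewrite | github.com/meetgoti07/Auto-Time-Table-Scheduling-System | backend/api/GA_helpers.py | find_continuous_slots
-- ===== SOURCE A (Python) =====
-- def find_continuous_slots(time_slots, length):
--     # Helper function to find continuous time slots for subjects needing more than one session
--
--     for i in range(len(time_slots) - (length - 1)):
--         is_continuous = all(
--             time_slots[i + j][1] == time_slots[i + j + 1][0]
--             for j in range(length - 1)
--         )
--         if is_continuous:
--             return time_slots[i:i + length]
--     return None
-- ===== SOURCE B (Python) =====
-- def find_continuous_slots(time_slots, length):
--     # Single forward pass counting the run of consecutive adjacencies.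
--     if length == 0:
--         return []
--     if length == 1:
--         return [time_slots[0]] if time_slots else None
--     run = 0
--     start = 0
--     for k in range(len(time_slots) - 1):
--         if time_slots[k][1] == time_slots[k + 1][0]:
--             if run == 0:
--                 start = k
--             run += 1
--             if run == length - 1:
--                 return time_slots[start:start + length]
--         else:
--             run = 0
--     return None
-- ===== Notes on version B (the rewrite author's own statement) =====
-- stated objective: faster
-- what changed: A re-tests every candidate window with a fresh all() scan of length-1 adjacencies; B makes one forward pass counting the run of consecutive adjacencies and returns as soon as the run reaches length-1.
-- outside the precondition, e.g. on find_continuous_slots([('a', 'b')], -1): A returns [], B returns None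
import Mathlib
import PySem

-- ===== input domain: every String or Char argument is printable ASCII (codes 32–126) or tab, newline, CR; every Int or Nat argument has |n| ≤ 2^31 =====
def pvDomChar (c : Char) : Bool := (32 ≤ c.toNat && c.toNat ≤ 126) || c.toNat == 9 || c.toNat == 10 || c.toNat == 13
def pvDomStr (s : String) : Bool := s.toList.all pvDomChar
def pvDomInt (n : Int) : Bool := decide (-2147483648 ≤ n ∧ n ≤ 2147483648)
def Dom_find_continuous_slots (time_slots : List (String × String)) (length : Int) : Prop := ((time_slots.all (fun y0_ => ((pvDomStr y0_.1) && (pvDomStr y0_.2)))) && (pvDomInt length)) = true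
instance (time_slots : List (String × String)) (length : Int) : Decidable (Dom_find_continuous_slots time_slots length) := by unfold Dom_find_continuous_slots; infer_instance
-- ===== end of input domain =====

-- B replaces A's quadratic "test every window" scan by one forward pass that counts the
-- current run of consecutive adjacencies (objective: faster, O(n·L) → O(n)).


-- ===== PORT A =====
-- shared helper: the Python expression time_slots[k][1] == time_slots[k+1][0]
-- (pyGet? models Python indexing; inside Pre_ every index used is in range, so no IndexError occurs)
def pvAdj (ts : List (String × String)) (i : Int) : Bool :=
  ((PySem.List.pyGet? ts i).map Prod.snd) == ((PySem.List.pyGet? ts (i + 1)).map Prod.fst)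

-- all(time_slots[i+j][1] == time_slots[i+j+1][0] for j in range(length-1))
def fcsCheck (ts : List (String × String)) (L i : Int) : Bool :=
  (PySem.List.pyRange 0 (L - 1) 1).all (fun j => pvAdj ts (i + j))

-- the "for i in range(...)" loop with early return
def fcsLoopA (ts : List (String × String)) (L : Int) : List Int → Option (List (String × String))
  | [] => none
  | i :: rest =>
      if fcsCheck ts L i then some (PySem.List.slice ts (some i) (some (i + L)))
      else fcsLoopA ts L rest

def find_continuous_slots (time_slots : List (String × String)) (length : Int) : Option (List (String × String)) :=
  fcsLoopA time_slots length (PySem.List.pyRange 0 ((time_slots.length : Int) - (length - 1)) 1)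

-- ===== PORT B =====
-- the "for k in range(len(time_slots)-1)" loop of Source B, state (run, start), early return
def fcsLoopB (ts : List (String × String)) (L : Int) : List Int → Int → Int → Option (List (String × String))
  | [], _, _ => none
  | k :: rest, run, start =>
      if pvAdj ts k then
        let start' := if run == 0 then k else start
        if run + 1 == L - 1 then some (PySem.List.slice ts (some start') (some (start' + L)))
        else fcsLoopB ts L rest (run + 1) start'
      else fcsLoopB ts L rest 0 start

def find_continuous_slots_alt (time_slots : List (String × String)) (length : Int) : Option (List (String × String)) :=
  if length == 0 then some []
  else if length == 1 then
    match time_slots with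
    | [] => none
    | x :: _ => some [x]
  else fcsLoopB time_slots length (PySem.List.pyRange 0 ((time_slots.length : Int) - 1) 1) 0 0

-- ===== PRECONDITION & SPEC =====
-- Pre_ excludes negative `length` (outside the function's natural domain of session counts),
-- where A returns a meaningless Python negative-slice of the first window.
def Pre_find_continuous_slots (time_slots : List (String × String)) (length : Int) : Prop := 0 ≤ length
instance (time_slots : List (String × String)) (length : Int) : Decidable (Pre_find_continuous_slots time_slots length) := by unfold Pre_find_continuous_slots; infer_instance
def pvWitness_find_continuous_slots : (List (String × String)) × Int := ([("a", "b"), ("b", "c")], 2)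

def Spec_find_continuous_slots (time_slots : List (String × String)) (length : Int) (out : Option (List (String × String))) : Prop := out = find_continuous_slots_alt time_slots length
instance (time_slots : List (String × String)) (length : Int) (out : Option (List (String × String))) : Decidable (Spec_find_continuous_slots time_slots length out) := by unfold Spec_find_continuous_slots; infer_instance

-- ===== CLAIM (what is proved, stated in full; the proofs are below) =====
def Claim_equal_find_continuous_slots : Prop := ∀ (time_slots : List (String × String)) (length : Int), Dom_find_continuous_slots time_slots length → Pre_find_continuous_slots time_slots length → Spec_find_continuous_slots time_slots length (find_continuous_slots time_slots length)

-- ===== LEMMAS AND PROOFS =====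

-- skipping a prefix of indices whose window-check fails does not change A's loop
lemma fcsLoopA_skip (ts : List (String × String)) (L : Int) :
    ∀ (d : Nat) (a b : Int),
      (∀ i : Int, a ≤ i → i < a + d → fcsCheck ts L i = false) →
      fcsLoopA ts L (PySem.List.pyRange a b 1) = fcsLoopA ts L (PySem.List.pyRange (a + d) b 1) := by
  intro d
  induction d with
  | zero => intro a b _; norm_num
  | succ d ih =>
      intro a b h
      by_cases hb : b ≤ a
      · rw [PySem.List.pyRange_one_eq_nil hb, PySem.List.pyRange_one_eq_nil (by push_cast; omega)]
      · rw [PySem.List.pyRange_one_cons (by omega)]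
        have hfalse : fcsCheck ts L a = false := h a le_rfl (by push_cast; omega)
        simp only [fcsLoopA, hfalse]
        have := ih (a + 1) b (fun i h1 h2 => h i (by omega) (by push_cast at h2 ⊢; omega))
        rw [this]
        push_cast
        ring_nf

lemma main_sim (ts : List (String × String)) (L : Int) (hL : 2 ≤ L) :
    ∀ (c : Nat) (k0 run start : Int),
      0 ≤ run → run ≤ k0 → run ≤ L - 2 →
      ((ts.length : Int) - 1 - k0 = c) →
      (run = 0 ∨ start = k0 - run) →
      (∀ j : Int, k0 - run ≤ j → j < k0 → pvAdj ts j = true) →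
      fcsLoopB ts L (PySem.List.pyRange k0 ((ts.length : Int) - 1) 1) run start
        = fcsLoopA ts L (PySem.List.pyRange (k0 - run) ((ts.length : Int) - (L - 1)) 1) := by
  intro c
  induction c with
  | zero =>
      intro k0 run start hr0 hrk hrL hc _hst _hadj
      rw [PySem.List.pyRange_one_eq_nil (by omega : (ts.length : Int) - 1 ≤ k0),
          PySem.List.pyRange_one_eq_nil (by omega : (ts.length : Int) - (L - 1) ≤ k0 - run)]
      rfl
  | succ c ih =>
      intro k0 run start hr0 hrk hrL hc hst hadj
      have hk0N : k0 < (ts.length : Int) - 1 := by omega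
      rw [PySem.List.pyRange_one_cons hk0N]
      by_cases hA : pvAdj ts k0 = true
      · -- adjacency holds at k0
        have hstart' : (if run == 0 then k0 else start) = k0 - run := by
          by_cases h0 : run = 0
          · simp [h0]
          · rcases hst with h | h
            · exact absurd h h0
            · simp [h0, h]
        by_cases hhit : run + 1 = L - 1
        · -- the window is complete: both return the slice at k0 - run
          have hBeq : (run + 1 == L - 1) = true := by simpa using hhit
          simp only [fcsLoopB, hA, if_true, hstart', hBeq]
          have hlt : k0 - run < (ts.length : Int) - (L - 1) := by omega
          rw [PySem.List.pyRange_one_cons hlt]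
          have hchk : fcsCheck ts L (k0 - run) = true := by
            simp only [fcsCheck, List.all_eq_true]
            intro j hj
            rw [PySem.List.mem_pyRange_one] at hj
            rcases lt_or_eq_of_le (show k0 - run + j ≤ k0 by omega) with hlt2 | heq2
            · exact hadj _ (by omega) hlt2
            · rw [heq2]; exact hA
          simp only [fcsLoopA, hchk, if_true]
        · -- window not complete yet: recurse with run+1
          have hBeq : (run + 1 == L - 1) = false := by simpa using hhit
          simp only [fcsLoopB, hA, if_true, hstart', hBeq, Bool.false_eq_true, if_false]
          have := ih (k0 + 1) (run + 1) (k0 - run) (by omega) (by omega) (by omega)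
            (by omega) (Or.inr (by ring)) (by
              intro j h1 h2
              rcases lt_or_eq_of_le (show j ≤ k0 by omega) with hlt2 | heq2
              · exact hadj _ (by omega) hlt2
              · rw [heq2]; exact hA)
          rw [show k0 + 1 - (run + 1) = k0 - run from by ring] at this
          rw [this]
      · -- adjacency fails at k0: reset run, and A skips all windows containing k0
        have hA' : pvAdj ts k0 = false := by simpa using hA
        simp only [fcsLoopB, hA', Bool.false_eq_true, if_false]
        have := ih (k0 + 1) 0 start (by omega) (by omega) (by omega) (by omega)
          (Or.inl rfl) (by intro j h1 h2; omega)
        rw [this]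
        have hskip := fcsLoopA_skip ts L (run + 1).toNat (k0 - run) ((ts.length : Int) - (L - 1))
          (by
            intro i h1 h2
            have h2' : i < k0 + 1 := by omega
            simp only [fcsCheck]
            rw [List.all_eq_false]
            refine ⟨k0 - i, ?_, ?_⟩
            · rw [PySem.List.mem_pyRange_one]; omega
            · have : i + (k0 - i) = k0 := by ring
              rw [this, hA']
              simp)
        rw [hskip]
        congr 2
        omega

lemma fcs_eq (ts : List (String × String)) (L : Int) (hL : 0 ≤ L) :
    find_continuous_slots ts L = find_continuous_slots_alt ts L := by
  by_cases h0 : L = 0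
  · subst h0
    rw [find_continuous_slots, find_continuous_slots_alt.eq_def]
    rw [PySem.List.pyRange_one_cons (by omega : (0:Int) < (ts.length : Int) - (0 - 1))]
    have hchk : fcsCheck ts 0 0 = true := by
      simp [fcsCheck]
    simp [fcsLoopA, hchk, PySem.List.slice_to]
  by_cases h1 : L = 1
  · subst h1
    rw [find_continuous_slots, find_continuous_slots_alt.eq_def]
    cases ts with
    | nil =>
        rw [PySem.List.pyRange_one_eq_nil (by simp)]
        rfl
    | cons x rest =>
        rw [PySem.List.pyRange_one_cons (by push_cast [List.length_cons]; omega)]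
        have hchk : fcsCheck (x :: rest) 1 0 = true := by
          simp [fcsCheck]
        simp [fcsLoopA, hchk, PySem.List.slice_to]
  · -- 2 ≤ L
    have hL2 : 2 ≤ L := by omega
    rw [find_continuous_slots, find_continuous_slots_alt.eq_def]
    have hne0 : (L == 0) = false := by simpa using h0
    have hne1 : (L == 1) = false := by simpa using h1
    rw [hne0, hne1]
    simp only [Bool.false_eq_true, if_false]
    cases ts with
    | nil =>
        rw [PySem.List.pyRange_one_eq_nil (by simp; omega),
            PySem.List.pyRange_one_eq_nil (by simp)]
        rfl
    | cons x rest =>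
        have hN : 1 ≤ ((x :: rest).length : Int) := by simp
        have := main_sim (x :: rest) L hL2 rest.length 0 0 0 le_rfl le_rfl
          (by omega) (by push_cast [List.length_cons]; omega) (Or.inl rfl)
          (by intro j h1 h2; omega)
        rw [this]
        norm_num

-- ===== VERDICT (by name: the statement is the Claim_ definition above) =====
theorem find_continuous_slots_spec : Claim_equal_find_continuous_slots := by
  intro ts L _hdom hpre
  unfold Spec_find_continuous_slots
  exact fcs_eq ts L hpre
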